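-- pv_equiv track=rewrite | github.com/HONGVELOPER/pythonBasic | coding_test/2017_friend_delete.py | solution
-- ===== SOURCE A (Python) =====
-- def solution(s):
--     stk = []
--     for i in s:
--         if len(stk) == 0:
--             stk.append(i)
--         elif i == stk[-1]:
--             stk.pop()
--         else:
--             stk.append(i)
--     if len(stk) == 0:
--         return 1
--     else:
--         return 0
-- ===== SOURCE B (Python) =====
-- def _one_pass(s):
--     out = []
--     i = 0
--     n = len(s)
--     while i < n:
--         if i + 1 < n and s[i] == s[i + 1]:
--             i += 2
--         else:
--             out.append(s[i])
--             i += 1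
--     return ''.join(out)
--
--
-- def solution(s):
--     cur = s
--     while True:
--         nxt = _one_pass(cur)
--         if nxt == cur:
--             return 1 if cur == "" else 0
--         cur = nxt
-- ===== Notes on version B (the rewrite author's own statement) =====
-- stated objective: alternative
-- what changed: Replaced the single-pass stack with a fixpoint loop: each pass scans the string deleting every non-overlapping adjacent equal pair, repeated until the string stops changing, then tests emptiness (confluence of the pair-deletion rewriting makes this exact).
import Mathlib
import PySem

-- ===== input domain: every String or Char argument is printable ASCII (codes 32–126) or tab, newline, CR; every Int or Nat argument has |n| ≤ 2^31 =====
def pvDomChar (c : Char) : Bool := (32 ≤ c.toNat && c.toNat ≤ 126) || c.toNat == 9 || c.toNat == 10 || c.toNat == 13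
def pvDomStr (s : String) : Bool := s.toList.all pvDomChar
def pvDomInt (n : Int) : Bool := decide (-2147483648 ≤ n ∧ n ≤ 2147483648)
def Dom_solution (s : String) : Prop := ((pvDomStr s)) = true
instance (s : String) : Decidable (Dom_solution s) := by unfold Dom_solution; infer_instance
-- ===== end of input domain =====

-- B replaces A's single-pass stack by a repeated-scan fixpoint (delete first adjacent equal pair
-- until none remains, then test emptiness): an alternative algorithm, not faster.


-- ===== PORT A =====
-- one loop step of A: push, or pop when the char equals stk[-1]
def solutionStep (stk : List Char) (i : Char) : List Char :=
  if stk.length = 0 then stk ++ [i]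
  else if i = stk.getLast! then stk.dropLast
  else stk ++ [i]

def solution (s : String) : Int :=
  let stk := s.toList.foldl solutionStep []
  if stk.length = 0 then 1 else 0

-- ===== PORT B =====
-- length lemmas cited by reduceLoop for termination
def onePass : List Char → List Char
  | [] => []
  | [a] => [a]
  | a :: b :: t => if a = b then onePass t else a :: onePass (b :: t)

theorem onePass_length : ∀ (l : List Char), (onePass l).length ≤ l.length
  | [] => le_refl _
  | [_] => le_refl _
  | a :: b :: t => by
    by_cases hab : a = b
    · simp only [onePass, if_pos hab, List.length_cons]
      have := onePass_length t
      omega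
    · simp only [onePass, if_neg hab, List.length_cons]
      have := onePass_length (b :: t)
      simp only [List.length_cons] at this
      omega

theorem onePass_lt : ∀ {l : List Char}, onePass l ≠ l → (onePass l).length < l.length
  | [], h => absurd rfl h
  | [_], h => absurd rfl h
  | a :: b :: t, h => by
    by_cases hab : a = b
    · simp only [onePass, if_pos hab, List.length_cons]
      have := onePass_length t
      omega
    · simp only [onePass, if_neg hab, List.length_cons] at *
      by_cases hfix : onePass (b :: t) = b :: t
      · exact absurd (by rw [hfix]) h
      · have := onePass_lt hfix
        simp only [List.length_cons] at this
        omega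

-- the while loop of B: run one pass of pair deletion until the string stops changing
def reduceLoop (l : List Char) : List Char :=
  if h : onePass l = l then l else reduceLoop (onePass l)
termination_by l.length
decreasing_by exact onePass_lt h

def solution_alt (s : String) : Int :=
  if reduceLoop s.toList = [] then 1 else 0

-- ===== PRECONDITION & SPEC =====
def Spec_solution (s : String) (out : Int) : Prop := out = solution_alt s
instance (s : String) (out : Int) : Decidable (Spec_solution s out) := by unfold Spec_solution; infer_instance

-- ===== CLAIM (what is proved, stated in full; the proofs are below) =====
def Claim_equal_solution : Prop := ∀ (s : String), Dom_solution s → Spec_solution s (solution s)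

-- ===== LEMMAS AND PROOFS =====

-- front-cons version of A's stack step, used only inside the proofs
def push (c : Char) : List Char → List Char
  | [] => [c]
  | d :: t => if c = d then t else c :: d :: t

def pushF (l : List Char) (st : List Char) : List Char := l.foldl (fun a c => push c a) st

theorem step_rev (stk : List Char) (i : Char) :
    solutionStep stk i = (push i stk.reverse).reverse := by
  rcases h : stk.reverse with _ | ⟨d, t⟩
  · have : stk = [] := by simpa using congrArg List.reverse h
    subst this; simp [solutionStep, push]
  · have hs : stk = t.reverse ++ [d] := by
      have := congrArg List.reverse h; simpa using this
    subst hs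
    by_cases hid : i = d
    · simp [solutionStep, push, hid]
    · simp [solutionStep, push, hid]

theorem foldl_step_rev (l : List Char) (st : List Char) :
    l.foldl solutionStep st = (pushF l st.reverse).reverse := by
  induction l generalizing st with
  | nil => simp [pushF]
  | cons c l ih =>
    simp only [List.foldl_cons, pushF]
    rw [ih, step_rev, List.reverse_reverse]
    rfl

theorem chain_push {st : List Char} (c : Char) (h : List.IsChain (· ≠ ·) st) :
    List.IsChain (· ≠ ·) (push c st) := by
  match st with
  | [] => exact List.isChain_singleton c
  | d :: t =>
    by_cases hcd : c = d
    · simpa [push, hcd] using h.tail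
    · rw [push, if_neg hcd]
      exact List.isChain_cons_cons.mpr ⟨hcd, h⟩

theorem push_push {st : List Char} (a : Char) (h : List.IsChain (· ≠ ·) st) :
    push a (push a st) = st := by
  match st with
  | [] => simp [push]
  | d :: t =>
    by_cases had : a = d
    · subst had
      match t with
      | [] => simp [push]
      | e :: t' =>
        have hde : a ≠ e := (List.isChain_cons_cons.mp h).1
        simp [push, hde]
    · simp [push, had]

theorem onePass_pushF : ∀ (l : List Char) (st : List Char),
    List.IsChain (· ≠ ·) st → pushF (onePass l) st = pushF l st
  | [], _, _ => rfl
  | [_], _, _ => rfl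
  | a :: b :: t, st, hst => by
    by_cases hab : a = b
    · subst hab
      have he : onePass (a :: a :: t) = onePass t := by simp [onePass]
      rw [he, onePass_pushF t st hst]
      simp only [pushF, List.foldl_cons]
      rw [push_push a hst]
    · simp only [onePass, if_neg hab, pushF, List.foldl_cons]
      exact onePass_pushF (b :: t) (push a st) (chain_push a hst)

theorem onePass_fix_chain : ∀ {l : List Char}, onePass l = l → List.IsChain (· ≠ ·) l
  | [], _ => List.isChain_nil
  | [c], _ => List.isChain_singleton c
  | a :: b :: t, h => by
    by_cases hab : a = b
    · exfalso
      simp only [onePass, if_pos hab] at h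
      have h1 := onePass_length t
      have h2 := congrArg List.length h
      simp only [List.length_cons] at h2
      omega
    · simp only [onePass, if_neg hab, List.cons.injEq, true_and] at h
      exact List.isChain_cons_cons.mpr ⟨hab, onePass_fix_chain h⟩

theorem push_of_head_ne {c : Char} {st : List Char} (hh : st.head? ≠ some c) :
    push c st = c :: st := by
  match st with
  | [] => simp [push]
  | d :: t =>
    have : c ≠ d := fun h => hh (by simp [h])
    simp [push, this]

theorem chain_fold : ∀ (l : List Char) (c : Char) (st : List Char),
    List.IsChain (· ≠ ·) (c :: l) → st.head? ≠ some c →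
    pushF (c :: l) st = l.reverse ++ c :: st
  | [], c, st, _, hh => by
    simp [pushF, push_of_head_ne hh]
  | b :: t, c, st, hch, hh => by
    have hcb : c ≠ b := (List.isChain_cons_cons.mp hch).1
    have ih := chain_fold t b (c :: st) (List.isChain_cons_cons.mp hch).2
      (by simpa using hcb)
    simp only [pushF, List.foldl_cons] at *
    rw [push_of_head_ne hh, ih]
    simp

theorem pushF_nil_eq_nil_iff {l : List Char} (h : onePass l = l) :
    pushF l [] = [] ↔ l = [] := by
  match l with
  | [] => simp [pushF]
  | c :: t =>
    have := chain_fold t c [] (onePass_fix_chain h) (by simp)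
    rw [this]; simp

theorem reduceLoop_pushF_aux : ∀ (n : Nat) (l : List Char), l.length ≤ n →
    pushF (reduceLoop l) [] = pushF l [] := by
  intro n
  induction n with
  | zero =>
    intro l hl
    rw [reduceLoop]
    split
    · rfl
    · next h => have := onePass_lt h; omega
  | succ n ih =>
    intro l hl
    rw [reduceLoop]
    split
    · rfl
    · next h =>
      have hlt := onePass_lt h
      rw [ih (onePass l) (by omega)]
      exact onePass_pushF l [] List.isChain_nil

theorem reduceLoop_fix_aux : ∀ (n : Nat) (l : List Char), l.length ≤ n →
    onePass (reduceLoop l) = reduceLoop l := by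
  intro n
  induction n with
  | zero =>
    intro l hl
    rw [reduceLoop]
    split
    · next h => exact h
    · next h => have := onePass_lt h; omega
  | succ n ih =>
    intro l hl
    rw [reduceLoop]
    split
    · next h => exact h
    · next h =>
      have hlt := onePass_lt h
      exact ih (onePass l) (by omega)

theorem reduceLoop_nil_iff (l : List Char) : reduceLoop l = [] ↔ pushF l [] = [] := by
  rw [← reduceLoop_pushF_aux l.length l le_rfl]
  exact (pushF_nil_eq_nil_iff (reduceLoop_fix_aux l.length l le_rfl)).symm

-- ===== VERDICT (by name: the statement is the Claim_ definition above) =====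
theorem solution_spec : Claim_equal_solution := by
  intro s _
  unfold Spec_solution solution solution_alt
  rw [foldl_step_rev]
  by_cases h : reduceLoop s.toList = []
  · have hp : pushF s.toList [] = [] := (reduceLoop_nil_iff s.toList).mp h
    simp [h, hp]
  · have hp : pushF s.toList [] ≠ [] := fun he => h ((reduceLoop_nil_iff s.toList).mpr he)
    simp [h, hp]
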